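-- pv_equiv track=rewrite | github.com/emory-courses/nlp-essentials | src/text_processing.py | delimit
-- ===== SOURCE A (Python) =====
-- def delimit(token: str, delimiters: set[str]) -> list[str]:
--     i = next((i for i, c in enumerate(token) if c in delimiters), -1)
--     if i < 0: return [token]
--     tokens = []
--
--     if i > 0: tokens.append(token[:i])
--     tokens.append(token[i])
--     if i + 1 < len(token): tokens.extend(delimit(token[i + 1:], delimiters))
--     return tokens
-- ===== SOURCE B (Python) =====
-- def delimit(token: str, delimiters: set[str]) -> list[str]:
--     out = []
--     run = []
--     for c in token:
--         if c in delimiters: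
--             if run:
--                 out.append(''.join(run))
--                 run = []
--             out.append(c)
--         else:
--             run.append(c)
--     if run:
--         out.append(''.join(run))
--     return out if out else [token]
-- ===== Notes on version B (the rewrite author's own statement) =====
-- stated objective: faster
-- what changed: replaced the recursive find-first-delimiter-then-slice scheme (repeated scans and string slicing) by a single left-to-right pass that accumulates the current run of non-delimiter characters and flushes it at each delimiter
import Mathlib
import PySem

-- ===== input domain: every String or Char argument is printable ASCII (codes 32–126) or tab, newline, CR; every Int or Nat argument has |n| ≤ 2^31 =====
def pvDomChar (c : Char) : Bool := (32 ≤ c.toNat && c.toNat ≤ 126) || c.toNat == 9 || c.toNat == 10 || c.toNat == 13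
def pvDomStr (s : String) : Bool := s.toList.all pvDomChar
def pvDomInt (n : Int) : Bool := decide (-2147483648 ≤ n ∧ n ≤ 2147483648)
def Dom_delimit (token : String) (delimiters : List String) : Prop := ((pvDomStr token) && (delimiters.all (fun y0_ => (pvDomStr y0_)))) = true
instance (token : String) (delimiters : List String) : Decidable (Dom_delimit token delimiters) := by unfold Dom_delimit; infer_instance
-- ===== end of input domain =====

-- B replaces A's recursive find-first-delimiter-then-slice scheme by a single
-- left-to-right pass accumulating the current run of non-delimiter characters.

-- ===== PORT A =====
-- A's `next((i for i, c in enumerate(token) if c in delimiters), -1)`: index of first delimiter char (none = -1)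
def firstDelim (ds : List String) : List Char → Option Nat
  | [] => none
  | c :: rest =>
      if ds.contains (String.ofList [c]) then some 0
      else (firstDelim ds rest).map (· + 1)

theorem firstDelim_lt {ds : List String} : ∀ {cs : List Char} {i : Nat},
    firstDelim ds cs = some i → i < cs.length := by
  intro cs
  induction cs with
  | nil => intro i h; simp [firstDelim] at h
  | cons c rest ih =>
      intro i h
      simp only [firstDelim] at h
      split at h
      · simp only [Option.some.injEq] at h; subst h; simp
      · rcases Option.map_eq_some_iff.mp h with ⟨j, hj, rfl⟩
        have := ih hj
        simp only [List.length_cons]; omega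

-- literal recursion of A: split at the first delimiter, recurse on the tail slice
def delimitCore (ds : List String) (cs : List Char) : List String :=
  match hfd : firstDelim ds cs with
  | none => [String.ofList cs]
  | some i =>
      (if 0 < i then [String.ofList (cs.take i)] else []) ++
      String.ofList [cs.getD i ' '] ::
      (if i + 1 < cs.length then delimitCore ds (cs.drop (i + 1)) else [])
termination_by cs.length
decreasing_by
  have := firstDelim_lt hfd
  simp only [List.length_drop]; omega

def delimit (token : String) (delimiters : List String) : List String :=
  delimitCore delimiters token.toList

-- ===== PORT B =====
-- one step of B's loop: state = (emitted tokens, current run of non-delimiter chars)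
def bStep (ds : List String) (p : List String × List Char) (c : Char) : List String × List Char :=
  if ds.contains (String.ofList [c]) then
    ((if p.2.isEmpty then p.1 else p.1 ++ [String.ofList p.2]) ++ [String.ofList [c]], [])
  else
    (p.1, p.2 ++ [c])

-- B's final `if run: out.append(''.join(run))`
def bFlush (s : List String × List Char) : List String :=
  if s.2.isEmpty then s.1 else s.1 ++ [String.ofList s.2]

def delimit_alt (token : String) (delimiters : List String) : List String :=
  let out := bFlush (token.toList.foldl (bStep delimiters) ([], []))
  if out.isEmpty then [token] else out

-- ===== PRECONDITION & SPEC =====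
def Spec_delimit (token : String) (delimiters : List String) (out : List String) : Prop := out = delimit_alt token delimiters
instance (token : String) (delimiters : List String) (out : List String) : Decidable (Spec_delimit token delimiters out) := by unfold Spec_delimit; infer_instance

-- ===== CLAIM (what is proved, stated in full; the proofs are below) =====
def Claim_equal_delimit : Prop := ∀ (token : String) (delimiters : List String), Dom_delimit token delimiters → Spec_delimit token delimiters (delimit token delimiters)

-- ===== LEMMAS AND PROOFS =====

theorem bFlush_append (out o : List String) (r : List Char) :
    bFlush (out ++ o, r) = out ++ bFlush (o, r) := by
  unfold bFlush; by_cases h : r.isEmpty <;> simp [h]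

theorem bStep_split (ds : List String) (p : List String × List Char) (c : Char) :
    bStep ds p c = (p.1 ++ (bStep ds ([], p.2) c).1, (bStep ds ([], p.2) c).2) := by
  by_cases hc : String.ofList [c] ∈ ds <;> by_cases hr : p.2.isEmpty <;> simp [bStep, hc, hr]

-- the emitted-tokens component is inert: it is only ever appended to
theorem foldl_bStep_out (ds : List String) : ∀ (cs : List Char) (p : List String × List Char),
    cs.foldl (bStep ds) p =
      (p.1 ++ (cs.foldl (bStep ds) ([], p.2)).1, (cs.foldl (bStep ds) ([], p.2)).2) := by
  intro cs
  induction cs with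
  | nil => intro p; simp
  | cons c rest ih =>
      intro p
      simp only [List.foldl_cons]
      rw [bStep_split ds p c, ih _, ih (bStep ds ([], p.2) c)]
      simp [List.append_assoc]

-- over a delimiter-free block the loop just extends the run
theorem foldl_bStep_clean (ds : List String) : ∀ (cs : List Char),
    (∀ c ∈ cs, ds.contains (String.ofList [c]) = false) →
    ∀ (out : List String) (run : List Char),
    cs.foldl (bStep ds) (out, run) = (out, run ++ cs) := by
  intro cs
  induction cs with
  | nil => intro _ out run; simp
  | cons c rest ih =>
      intro h out run
      have hc : ds.contains (String.ofList [c]) = false := h c (by simp)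
      simp only [List.foldl_cons, bStep, hc]
      simp [ih (fun x hx => h x (by simp [hx])) out (run ++ [c])]

theorem firstDelim_none {ds : List String} : ∀ {cs : List Char},
    firstDelim ds cs = none → ∀ c ∈ cs, ds.contains (String.ofList [c]) = false := by
  intro cs
  induction cs with
  | nil => simp
  | cons c rest ih =>
      intro h x hx
      simp only [firstDelim] at h
      split at h
      · simp at h
      · next hc =>
          rw [List.mem_cons] at hx
          rcases hx with hx | hx
          · subst hx; simpa using hc
          · exact ih (by simpa using h) x hx

theorem firstDelim_take {ds : List String} : ∀ {cs : List Char} {i : Nat},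
    firstDelim ds cs = some i → ∀ c ∈ cs.take i, ds.contains (String.ofList [c]) = false := by
  intro cs
  induction cs with
  | nil => intro i h; simp [firstDelim] at h
  | cons c rest ih =>
      intro i h x hx
      simp only [firstDelim] at h
      split at h
      · simp only [Option.some.injEq] at h; subst h; simp at hx
      · next hc =>
          rcases Option.map_eq_some_iff.mp h with ⟨j, hj, rfl⟩
          simp only [List.take_succ_cons, List.mem_cons] at hx
          rcases hx with hx | hx
          · subst hx; simpa using hc
          · exact ih hj x hx

theorem firstDelim_hit {ds : List String} : ∀ {cs : List Char} {i : Nat},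
    firstDelim ds cs = some i → ds.contains (String.ofList [cs.getD i ' ']) = true := by
  intro cs
  induction cs with
  | nil => intro i h; simp [firstDelim] at h
  | cons c rest ih =>
      intro i h
      simp only [firstDelim] at h
      split at h
      · next hc =>
          simp only [Option.some.injEq] at h; subst h
          simpa using hc
      · rcases Option.map_eq_some_iff.mp h with ⟨j, hj, rfl⟩
        simpa using ih hj

-- main invariant: on a nonempty char list, B's pass computes A's recursion
theorem main_eq (ds : List String) : ∀ (n : Nat) (cs : List Char), cs.length ≤ n → cs ≠ [] →
    bFlush (cs.foldl (bStep ds) ([], [])) = delimitCore ds cs := by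
  intro n
  induction n with
  | zero => intro cs hlen hne; cases cs <;> simp_all
  | succ n ih =>
      intro cs hlen hne
      rw [delimitCore]
      split
      · next hfd =>
          rw [foldl_bStep_clean ds cs (firstDelim_none hfd)]
          unfold bFlush
          simp [List.isEmpty_iff, hne]
      · next i hfd =>
          have hi : i < cs.length := firstDelim_lt hfd
          have hgetD : cs.getD i ' ' = cs[i] := List.getD_eq_getElem cs ' ' hi
          have hd : ds.contains (String.ofList [cs[i]]) = true := by
            rw [← hgetD]; exact firstDelim_hit hfd
          have hsplit : cs = cs.take i ++ cs[i] :: cs.drop (i + 1) := by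
            conv_lhs => rw [← List.take_append_drop i cs]
            rw [List.drop_eq_getElem_cons hi]
          conv_lhs => rw [hsplit]
          rw [List.foldl_append, foldl_bStep_clean ds _ (firstDelim_take hfd) [] []]
          simp only [List.foldl_cons, bStep, hd, if_pos, List.nil_append]
          rw [foldl_bStep_out ds (cs.drop (i + 1)) _]
          simp only []
          rw [bFlush_append]
          rw [hgetD]
          by_cases hrest : i + 1 < cs.length
          · have hb : cs.drop (i + 1) ≠ [] := by
              intro hx
              have := List.drop_eq_nil_iff.mp hx; omega
            rw [ih (cs.drop (i + 1)) (by simp only [List.length_drop]; omega) hb]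
            by_cases h0 : i = 0
            · subst h0; simp [hrest]
            · have ht : (cs.take i).isEmpty = false := by
                have : cs.take i ≠ [] := by
                  simp only [ne_eq, List.take_eq_nil_iff]
                  push_neg
                  constructor <;> omega
                simpa [List.isEmpty_iff] using this
              simp [ht, hrest, Nat.pos_of_ne_zero h0]
          · have hb : cs.drop (i + 1) = [] := List.drop_eq_nil_iff.mpr (by omega)
            rw [hb]
            simp only [List.foldl_nil]
            by_cases h0 : i = 0
            · subst h0; simp [bFlush, hrest]
            · have ht : (cs.take i).isEmpty = false := by
                have : cs.take i ≠ [] := by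
                  simp only [ne_eq, List.take_eq_nil_iff]
                  push_neg
                  constructor <;> omega
                simpa [List.isEmpty_iff] using this
              simp [bFlush, ht, hrest, Nat.pos_of_ne_zero h0]

theorem delimitCore_ne_nil (ds : List String) (cs : List Char) : delimitCore ds cs ≠ [] := by
  rw [delimitCore]
  split
  · simp
  · next i hfd =>
      rcases Nat.eq_zero_or_pos i with h0 | h0 <;> simp [h0]

-- ===== VERDICT (by name: the statement is the Claim_ definition above) =====
theorem delimit_spec : Claim_equal_delimit := by
  intro token delimiters _
  unfold Spec_delimit
  by_cases h : token.toList = []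
  · have htok : token = "" := String.toList_eq_nil_iff.mp h
    unfold delimit delimit_alt
    rw [h]
    simp only [List.foldl_nil]
    rw [delimitCore]
    split
    · simp [bFlush, htok]
    · next i hfd => simp [firstDelim] at hfd
  · have hmain := main_eq delimiters token.toList.length token.toList (le_refl _) h
    have hne := delimitCore_ne_nil delimiters token.toList
    simp only [delimit, delimit_alt]
    rw [hmain]
    have hf : (delimitCore delimiters token.toList).isEmpty = false := by
      cases hc : delimitCore delimiters token.toList with
      | nil => exact absurd hc hne
      | cons a l => simp
    rw [hf]
    simp
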